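-- pv_equiv track=rewrite | github.com/DONofDESTROY/codingPratice | simpleProgramming/greatestPalindrome.py | mainWindowMaker
-- ===== SOURCE A (Python) =====
-- def isPalindrome(arr):
--     size = len(arr)
--     flag = True
--     for i in range(size//2):
--         if(abs(arr[i])!=abs(arr[-(i+1)])):
--             flag = False
--     return flag
--
-- def mainWindowMaker(arr):
--     maxSoFar = [arr[0]]
--     for i in range(len(arr)+1):
--         for j in range(len(arr)+1):
--             window = arr[i:j]
--             if(len(window)>0):
--                 if(isPalindrome(window)):
--                     if(len(window)> len(maxSoFar)):
--                         maxSoFar = window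
--     return maxSoFar
-- ===== SOURCE B (Python) =====
-- def mainWindowMaker(arr):
--     n = len(arr)
--     a = [abs(x) for x in arr]
--     for L in range(n, 0, -1):
--         for i in range(n - L + 1):
--             w = a[i:i + L]
--             if w == w[::-1]:
--                 return arr[i:i + L]
--     return []
-- ===== Notes on version B (the rewrite author's own statement) =====
-- stated objective: alternative
-- what changed: Instead of scanning all O(n^2) windows and keeping the longest palindromic one in an accumulator, B precomputes the abs list once and searches window lengths from longest to shortest, returning the first palindromic window found (early exit, reverse-comparison palindrome check instead of an index half-scan).
-- crash fix: A raises IndexError on the empty list (arr[0]); B returns []. — e.g. on mainWindowMaker([]): A raises IndexError, B returns []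
import Mathlib
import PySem

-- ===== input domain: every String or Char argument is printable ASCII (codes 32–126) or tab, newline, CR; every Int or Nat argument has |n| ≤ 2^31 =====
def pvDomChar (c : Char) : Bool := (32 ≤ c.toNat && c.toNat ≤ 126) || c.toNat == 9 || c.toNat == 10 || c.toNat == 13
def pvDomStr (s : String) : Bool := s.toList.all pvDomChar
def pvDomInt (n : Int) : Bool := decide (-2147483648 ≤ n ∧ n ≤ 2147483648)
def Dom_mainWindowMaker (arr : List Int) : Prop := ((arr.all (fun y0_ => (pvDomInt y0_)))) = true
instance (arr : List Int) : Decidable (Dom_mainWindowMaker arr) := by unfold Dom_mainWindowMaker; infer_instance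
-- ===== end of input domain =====

-- B scans window lengths from longest to shortest and returns the first palindromic window
-- (early exit), checking palindromes by reverse-comparison on a precomputed abs list
-- (objective: alternative; same worst-case order, early exit instead of a full scan).

-- ===== PORT A =====
def isPalindrome (arr : List Int) : Bool :=
  -- indices i and -(i+1) are always in range for i < size//2, so pyGetD is exact here
  (PySem.List.pyRange 0 (PySem.Int.floordiv (arr.length : Int) 2) 1).foldl
    (fun flag i =>
      if |PySem.List.pyGetD arr i 0| ≠ |PySem.List.pyGetD arr (-(i + 1)) 0| then false
      else flag)
    true

def mainWindowMaker (arr : List Int) : List Int :=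
  -- arr[0] raises IndexError on the empty list: Pre_ excludes it, pyGetD's default is never used
  (PySem.List.pyRange 0 ((arr.length : Int) + 1) 1).foldl
    (fun maxSoFar i =>
      (PySem.List.pyRange 0 ((arr.length : Int) + 1) 1).foldl
        (fun maxSoFar j =>
          let window := PySem.List.slice arr (some i) (some j)
          if window.length > 0 then
            if isPalindrome window then
              if window.length > maxSoFar.length then window else maxSoFar
            else maxSoFar
          else maxSoFar)
        maxSoFar)
    [PySem.List.pyGetD arr 0 0]

-- ===== PORT B =====
-- w == w[::-1]; xs[::-1] is xs.reverse (PySem.List.slice?_none_none_neg_one)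
def mwmCheck (w : List Int) : Bool := w == w.reverse

-- 'for L in range(n, 0, -1)' with early return: structural recursion on L;
-- the inner 'for i in range(n - L + 1)' with early return is find? over that range
def mwmSearch (arr a : List Int) : Nat → List Int
  | 0 => []
  | (L + 1) =>
    match (PySem.List.pyRange 0 ((arr.length : Int) - ((L : Int) + 1) + 1) 1).find?
        (fun i => mwmCheck (PySem.List.slice a (some i) (some (i + ((L : Int) + 1))))) with
    | some i => PySem.List.slice arr (some i) (some (i + ((L : Int) + 1)))
    | none => mwmSearch arr a L

def mainWindowMaker_alt (arr : List Int) : List Int :=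
  mwmSearch arr (arr.map (fun x => |x|)) arr.length

-- ===== PRECONDITION & SPEC =====
-- Pre_ excludes only the empty list, on which A raises IndexError at arr[0].
def Pre_mainWindowMaker (arr : List Int) : Prop := arr ≠ []
instance (arr : List Int) : Decidable (Pre_mainWindowMaker arr) := by
  unfold Pre_mainWindowMaker; infer_instance
def pvWitness_mainWindowMaker : List Int := [1, -2, 2]

-- A raises IndexError on the empty list; B returns [].
def Raises_mainWindowMaker (arr : List Int) : Prop := arr = []
instance (arr : List Int) : Decidable (Raises_mainWindowMaker arr) := by
  unfold Raises_mainWindowMaker; infer_instance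
def pvRaiseWitness_mainWindowMaker : List Int := []
def pvRaiseWitnessOut_mainWindowMaker : List Int := []

def Spec_mainWindowMaker (arr : List Int) (out : List Int) : Prop := out = mainWindowMaker_alt arr
instance (arr : List Int) (out : List Int) : Decidable (Spec_mainWindowMaker arr out) := by
  unfold Spec_mainWindowMaker; infer_instance

-- ===== CLAIM (what is proved, stated in full; the proofs are below) =====
def Claim_equal_mainWindowMaker : Prop := ∀ (arr : List Int), Dom_mainWindowMaker arr → Pre_mainWindowMaker arr → Spec_mainWindowMaker arr (mainWindowMaker arr)
def Claim_raises_mainWindowMaker : Prop := (∀ (arr : List Int), Dom_mainWindowMaker arr → Raises_mainWindowMaker arr → ¬ Pre_mainWindowMaker arr) ∧ (Dom_mainWindowMaker (pvRaiseWitness_mainWindowMaker) ∧ Raises_mainWindowMaker (pvRaiseWitness_mainWindowMaker) ∧ mainWindowMaker_alt (pvRaiseWitness_mainWindowMaker) = pvRaiseWitnessOut_mainWindowMaker)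

-- ===== LEMMAS AND PROOFS =====

/-- The window of `xs` starting at `i` with (at most) `L` elements. -/
def mwmWin (xs : List Int) (i L : Nat) : List Int := (xs.drop i).take L

/-- Elementwise absolute values. -/
def mwmAbs (xs : List Int) : List Int := xs.map (fun x => |x|)

/-- A's loop body, normalized. -/
def mwmUpd (s w : List Int) : List Int :=
  if mwmCheck (mwmAbs w) && decide (s.length < w.length) then w else s

/-- "some length-`L` window (within bounds) has palindromic absolute values". -/
def mwmPB (arr : List Int) (L : Nat) : Bool :=
  decide (∃ i, i < arr.length + 1 ∧ i + L ≤ arr.length ∧ mwmCheck (mwmWin (mwmAbs arr) i L) = true)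

/-- The maximal palindromic-window length. -/
def mwmLmax (arr : List Int) : Nat := Nat.findGreatest (fun L => mwmPB arr L = true) arr.length

theorem mwmAbs_win (xs : List Int) (i L : Nat) :
    mwmAbs (mwmWin xs i L) = mwmWin (mwmAbs xs) i L := by
  simp [mwmAbs, mwmWin, List.map_take, List.map_drop]

theorem mwmP_one (arr : List Int) (h : arr ≠ []) : mwmPB arr 1 = true := by
  obtain ⟨x, t, rfl⟩ := List.exists_cons_of_ne_nil h
  simp only [mwmPB, decide_eq_true_eq]
  exact ⟨0, by simp, by simp, by simp [mwmWin, mwmAbs, mwmCheck]⟩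

theorem length_mwmAbs (xs : List Int) : (mwmAbs xs).length = xs.length := by
  simp [mwmAbs]

/-- A list equals its reverse iff the first half mirrors the second half. -/
theorem pal_iff_half (l : List Int) :
    l = l.reverse ↔ ∀ k, k < l.length / 2 → l[k]? = l[l.length - 1 - k]? := by
  constructor
  · intro h k hk
    have hk' : k < l.length := by omega
    conv_lhs => rw [h]
    exact List.getElem?_reverse hk'
  · intro h
    apply List.ext_getElem?
    intro i
    by_cases hi : i < l.length
    · rw [List.getElem?_reverse hi]
      have htri : i < l.length / 2 ∨ (l.length - 1 - i) < l.length / 2 ∨ i = l.length - 1 - i := by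
        omega
      rcases htri with h1 | h2 | h3
      · exact h i h1
      · have := h _ h2
        have heq : l.length - 1 - (l.length - 1 - i) = i := by omega
        rw [heq] at this
        exact this.symm
      · rw [← h3]
    · have h1 : l.length ≤ i := by omega
      rw [List.getElem?_eq_none h1, List.getElem?_eq_none (by simpa using h1)]

theorem mwmCheck_eq_half (w : List Int) :
    mwmCheck w = true ↔ ∀ k, k < w.length / 2 → w[k]? = w[w.length - 1 - k]? := by
  rw [mwmCheck, beq_iff_eq]
  exact pal_iff_half w

theorem cond_iff (v : List Int) (k : Nat) (hk : k < v.length) :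
    (|PySem.List.pyGetD v (k : Int) 0| = |PySem.List.pyGetD v (-((k : Int) + 1)) 0|) ↔
      (mwmAbs v)[k]? = (mwmAbs v)[(mwmAbs v).length - 1 - k]? := by
  have hk2 : v.length - (k + 1) < v.length := by omega
  rw [PySem.List.pyGetD_natCast,
    show (-((k : Int) + 1)) = -(((k + 1 : Nat) : Int)) by push_cast; ring,
    PySem.List.pyGetD_neg_natCast v (k + 1) 0 (by omega) (by omega)]
  have e0 : v.getD k 0 = v[k] := by
    rw [List.getD_eq_getElem?_getD, List.getElem?_eq_getElem hk]; rfl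
  have e1 : (mwmAbs v)[k]? = some |v[k]| := by
    simp [mwmAbs, List.getElem?_eq_getElem hk]
  have e2 : (mwmAbs v)[(mwmAbs v).length - 1 - k]? = some |v[v.length - (k + 1)]| := by
    have h3 : (mwmAbs v).length - 1 - k = v.length - (k + 1) := by
      rw [length_mwmAbs]; omega
    rw [h3]
    simp [mwmAbs, List.getElem?_eq_getElem hk2]
  rw [e0, e1, e2]
  exact ⟨fun h => by rw [h], fun h => Option.some.inj h⟩

theorem isPal_eq (v : List Int) : isPalindrome v = mwmCheck (mwmAbs v) := by
  unfold isPalindrome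
  have hfd : PySem.Int.floordiv (v.length : Int) 2 = ((v.length / 2 : Nat) : Int) := by
    rw [PySem.Int.floordiv_eq_ediv_of_pos (by norm_num)]
    omega
  rw [hfd, PySem.List.pyRange_zero_natCast, List.foldl_map]
  have hb : (List.range (v.length / 2)).foldl
      (fun (flag : Bool) (k : Nat) =>
        if |PySem.List.pyGetD v (k : Int) 0| ≠ |PySem.List.pyGetD v (-((k : Int) + 1)) 0| then false
        else flag) true =
      (List.range (v.length / 2)).foldl
      (fun (flag : Bool) (k : Nat) =>
        if (fun k : Nat => decide
            (|PySem.List.pyGetD v (k : Int) 0| ≠ |PySem.List.pyGetD v (-((k : Int) + 1)) 0|)) k = true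
          then false else flag) true := by
    refine PySem.List.foldl_congr_mem _ _ _ _ ?_
    intro acc k _
    simp
  rw [hb, PySem.List.foldl_if_false_eq, Bool.true_and]
  rw [Bool.eq_iff_iff]
  rw [mwmCheck_eq_half]
  rw [Bool.not_eq_eq_eq_not, Bool.not_true, List.any_eq_false]
  simp only [List.mem_range, decide_eq_true_eq, not_not]
  constructor
  · intro h k hk
    rw [length_mwmAbs] at hk
    exact (cond_iff v k (by omega)).mp (h k hk)
  · intro h k hk
    exact (cond_iff v k (by omega)).mpr (h k (by rw [length_mwmAbs]; omega))

theorem body_eq (s w : List Int) :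
    (if w.length > 0 then
        if mwmCheck (mwmAbs w) then
          if w.length > s.length then w else s
        else s
      else s) = mwmUpd s w := by
  unfold mwmUpd
  by_cases hc : mwmCheck (mwmAbs w) = true
  · by_cases hl : s.length < w.length
    · rw [if_pos (by omega : w.length > 0), if_pos hc,
        if_pos (by omega : w.length > s.length), if_pos (by simp [hc, hl])]
    · by_cases h0 : w.length > 0
      · rw [if_pos h0, if_pos hc, if_neg (by omega : ¬ w.length > s.length),
          if_neg (by simp [hl])]
      · rw [if_neg h0, if_neg (by simp [hl])]
  · have hc' : mwmCheck (mwmAbs w) = false := by simpa using hc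
    by_cases h0 : w.length > 0
    · rw [if_pos h0, if_neg (by simp [hc']), if_neg (by simp [hc'])]
    · rw [if_neg h0, if_neg (by simp [hc'])]

theorem foldl_upd_mem (l : List (List Int)) (s : List Int) :
    l.foldl mwmUpd s = s ∨
      (l.foldl mwmUpd s ∈ l ∧ mwmCheck (mwmAbs (l.foldl mwmUpd s)) = true) := by
  induction l generalizing s with
  | nil => exact Or.inl rfl
  | cons w t ih =>
    simp only [List.foldl_cons]
    rcases ih (mwmUpd s w) with h | ⟨hm, hp⟩
    · rw [h]; unfold mwmUpd
      split
      · next hcond => exact Or.inr ⟨List.mem_cons_self, ((Bool.and_eq_true _ _).mp hcond).1⟩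
      · exact Or.inl rfl
    · exact Or.inr ⟨List.mem_cons_of_mem _ hm, hp⟩

theorem foldl_upd_const (l : List (List Int)) (s : List Int)
    (h : ∀ w ∈ l, mwmCheck (mwmAbs w) = true → w.length ≤ s.length) :
    l.foldl mwmUpd s = s := by
  induction l with
  | nil => rfl
  | cons w t ih =>
    simp only [List.foldl_cons]
    have hw : mwmUpd s w = s := by
      unfold mwmUpd
      by_cases h1 : mwmCheck (mwmAbs w) = true
      · have h2 := h w List.mem_cons_self h1
        rw [if_neg (by simp [h1]; omega)]
      · rw [if_neg (by simp [h1])]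
    rw [hw]
    exact ih (fun v hv hp => h v (List.mem_cons_of_mem _ hv) hp)

theorem foldl_upd_first (l₁ l₂ : List (List Int)) (s w : List Int)
    (hw : mwmCheck (mwmAbs w) = true)
    (h₁ : ∀ v ∈ l₁, mwmCheck (mwmAbs v) = true → v.length < w.length)
    (hs : s.length < w.length)
    (h₂ : ∀ v ∈ l₂, mwmCheck (mwmAbs v) = true → v.length ≤ w.length) :
    (l₁ ++ w :: l₂).foldl mwmUpd s = w := by
  rw [List.foldl_append]
  have hacc : (l₁.foldl mwmUpd s).length < w.length := by
    rcases foldl_upd_mem l₁ s with h | ⟨hm, hp⟩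
    · rw [h]; exact hs
    · exact h₁ _ hm hp
  simp only [List.foldl_cons]
  have hstep : mwmUpd (l₁.foldl mwmUpd s) w = w := by
    show (if mwmCheck (mwmAbs w) && decide ((l₁.foldl mwmUpd s).length < w.length) then w
        else l₁.foldl mwmUpd s) = w
    rw [if_pos (by simp only [Bool.and_eq_true, decide_eq_true_eq]; exact ⟨hw, hacc⟩)]
  rw [hstep]
  exact foldl_upd_const _ _ h₂

/-- Every slice `xs[i:j]` with `0 ≤ i ≤ len`, `0 ≤ j` is an exact-length window. -/
theorem slice_window_char (xs : List Int) (i j : Int) (h0 : 0 ≤ i) (h0' : 0 ≤ j)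
    (hin : i.toNat ≤ xs.length) :
    ∃ ℓ, i.toNat + ℓ ≤ xs.length ∧
      PySem.List.slice xs (some i) (some j) = mwmWin xs i.toNat ℓ ∧
      (PySem.List.slice xs (some i) (some j)).length = ℓ ∧ ℓ ≤ j.toNat - i.toNat := by
  rw [PySem.List.slice_toNat xs h0 h0']
  set m := j.toNat - i.toNat with hm
  set l' := xs.drop i.toNat with hl'
  have hlen : l'.length = xs.length - i.toNat := List.length_drop
  refine ⟨min m l'.length, by omega, ?_, by simp, by omega⟩
  rw [mwmWin, ← hl']
  rcases Nat.le_total m l'.length with hc | hc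
  · rw [min_eq_left hc]
  · rw [min_eq_right hc, List.take_of_length_le hc,
      List.take_of_length_le le_rfl]

theorem pal_le_Lmax (arr : List Int) (i ℓ : Nat) (h : i + ℓ ≤ arr.length)
    (hp : mwmCheck (mwmWin (mwmAbs arr) i ℓ) = true) : ℓ ≤ mwmLmax arr :=
  Nat.le_findGreatest (by omega)
    (by simp only [mwmPB, decide_eq_true_eq]; exact ⟨i, by omega, h, hp⟩)

/-- Bound for any slice member of A's scan: palindromic ⇒ length ≤ Lmax. -/
theorem slice_pal_bound (arr : List Int) (i j : Int) (h0 : 0 ≤ i) (h0' : 0 ≤ j)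
    (hin : i.toNat ≤ arr.length)
    (hp : mwmCheck (mwmAbs (PySem.List.slice arr (some i) (some j))) = true) :
    (PySem.List.slice arr (some i) (some j)).length ≤ mwmLmax arr := by
  obtain ⟨ℓ, hb, hew, hlen, _⟩ := slice_window_char arr i j h0 h0' hin
  rw [hlen]
  rw [hew, mwmAbs_win] at hp
  exact pal_le_Lmax arr i.toNat ℓ hb hp

theorem find?_range_eq_some (K m : Nat) (q : Nat → Bool) (hm : q m = true)
    (hmin : ∀ j, j < m → q j = false) (hK : m < K) :
    (List.range K).find? q = some m := by
  have hsplit : List.range K = List.range m ++ (List.range (K - m)).map (fun x => m + x) := by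
    rw [← List.range_add]
    congr 1
    omega
  rw [hsplit, List.find?_append]
  have h1 : (List.range m).find? q = none :=
    List.find?_eq_none.mpr (fun x hx => by simp [hmin x (List.mem_range.mp hx)])
  rw [h1, Option.none_or]
  have h2 : K - m = (K - m - 1) + 1 := by omega
  rw [h2, List.range_succ_eq_map, List.map_cons]
  simp [hm]

-- ===== A-side characterization =====

theorem A_norm (arr : List Int) :
    mainWindowMaker arr =
      ((PySem.List.pyRange 0 ((arr.length : Int) + 1) 1).flatMap
        (fun i => (PySem.List.pyRange 0 ((arr.length : Int) + 1) 1).map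
          (fun j => PySem.List.slice arr (some i) (some j)))).foldl mwmUpd
        [PySem.List.pyGetD arr 0 0] := by
  unfold mainWindowMaker
  rw [List.foldl_flatMap]
  refine PySem.List.foldl_congr_mem _ _ _ _ ?_
  intro acc i _
  rw [List.foldl_map]
  refine PySem.List.foldl_congr_mem _ _ _ _ ?_
  intro acc' j _
  show (if (PySem.List.slice arr (some i) (some j)).length > 0 then
      if isPalindrome (PySem.List.slice arr (some i) (some j)) then
        if (PySem.List.slice arr (some i) (some j)).length > acc'.length then
          PySem.List.slice arr (some i) (some j)
        else acc'
      else acc'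
    else acc') = mwmUpd acc' (PySem.List.slice arr (some i) (some j))
  rw [isPal_eq]
  exact body_eq acc' _

theorem A_eq (arr : List Int) (h : arr ≠ [])
    (hP : ∃ i, i < arr.length + 1 ∧ i + mwmLmax arr ≤ arr.length ∧
      mwmCheck (mwmWin (mwmAbs arr) i (mwmLmax arr)) = true) :
    mainWindowMaker arr = mwmWin arr (Nat.find hP) (mwmLmax arr) := by
  have hn : 1 ≤ arr.length := List.length_pos_iff.mpr h
  have hL1 : 1 ≤ mwmLmax arr := Nat.le_findGreatest hn (mwmP_one arr h)
  have hLn : mwmLmax arr ≤ arr.length := Nat.findGreatest_le _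
  obtain ⟨hi0n, hi0M, hi0pal⟩ := Nat.find_spec hP
  set i0 := Nat.find hP with hi0def
  obtain ⟨x, t, harr⟩ := List.exists_cons_of_ne_nil h
  have hinit : [PySem.List.pyGetD arr 0 0] = mwmWin arr 0 1 := by
    rw [harr]; simp [PySem.List.pyGetD_zero, mwmWin]
  have hinitlen : ([PySem.List.pyGetD arr 0 0]).length = 1 := rfl
  rw [A_norm]
  rcases eq_or_lt_of_le hL1 with hM1 | hM2
  · -- maximal palindromic length is 1: A never updates, keeps [arr[0]]
    have hall : ∀ w ∈ (PySem.List.pyRange 0 ((arr.length : Int) + 1) 1).flatMap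
        (fun i => (PySem.List.pyRange 0 ((arr.length : Int) + 1) 1).map
          (fun j => PySem.List.slice arr (some i) (some j))),
        mwmCheck (mwmAbs w) = true → w.length ≤ ([PySem.List.pyGetD arr 0 0]).length := by
      intro w hw hp
      simp only [List.mem_flatMap, List.mem_map] at hw
      obtain ⟨i, hi, j, hj, rfl⟩ := hw
      rw [PySem.List.mem_pyRange_one] at hi hj
      have hb := slice_pal_bound arr i j hi.1 hj.1 (by omega) hp
      rw [hinitlen]; omega
    rw [foldl_upd_const _ _ hall, hinit]
    have hpal0 : mwmCheck (mwmWin (mwmAbs arr) 0 (mwmLmax arr)) = true := by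
      rw [← hM1, harr]; simp [mwmAbs, mwmWin, mwmCheck]
    have hi00 : i0 = 0 := by
      rw [hi0def, Nat.find_eq_zero]
      exact ⟨by omega, by omega, hpal0⟩
    rw [hi00, ← hM1]
  · -- maximal palindromic length M ≥ 2: the scan's value is the first window of length M
    have hwstar : PySem.List.slice arr (some (i0 : Int)) (some ((i0 + mwmLmax arr : Nat) : Int)) =
        mwmWin arr i0 (mwmLmax arr) := by
      rw [PySem.List.slice_natCast, mwmWin, Nat.add_sub_cancel_left]
    have hwlen : (mwmWin arr i0 (mwmLmax arr)).length = mwmLmax arr := by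
      simp [mwmWin]; omega
    have hsplit : PySem.List.pyRange 0 ((arr.length : Int) + 1) 1 =
        PySem.List.pyRange 0 (i0 : Int) 1 ++ (i0 : Int) ::
          PySem.List.pyRange ((i0 : Int) + 1) ((arr.length : Int) + 1) 1 := by
      rw [← PySem.List.pyRange_one_cons (by omega : (i0 : Int) < (arr.length : Int) + 1)]
      exact PySem.List.pyRange_one_append 0 (i0 : Int) _ (by omega) (by omega)
    have hsplitJ : PySem.List.pyRange 0 ((arr.length : Int) + 1) 1 =
        PySem.List.pyRange 0 ((i0 + mwmLmax arr : Nat) : Int) 1 ++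
          ((i0 + mwmLmax arr : Nat) : Int) ::
          PySem.List.pyRange (((i0 + mwmLmax arr : Nat) : Int) + 1) ((arr.length : Int) + 1) 1 := by
      rw [← PySem.List.pyRange_one_cons (by omega : ((i0 + mwmLmax arr : Nat) : Int) < (arr.length : Int) + 1)]
      exact PySem.List.pyRange_one_append 0 _ _ (by omega) (by omega)
    have hmid : (PySem.List.pyRange 0 ((arr.length : Int) + 1) 1).map
        (fun j => PySem.List.slice arr (some (i0 : Int)) (some j)) =
        (PySem.List.pyRange 0 ((i0 + mwmLmax arr : Nat) : Int) 1).map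
          (fun j => PySem.List.slice arr (some (i0 : Int)) (some j)) ++
        mwmWin arr i0 (mwmLmax arr) ::
        (PySem.List.pyRange (((i0 + mwmLmax arr : Nat) : Int) + 1) ((arr.length : Int) + 1) 1).map
          (fun j => PySem.List.slice arr (some (i0 : Int)) (some j)) := by
      rw [hsplitJ, List.map_append, List.map_cons, hwstar]
    have hBig : (PySem.List.pyRange 0 ((arr.length : Int) + 1) 1).flatMap
        (fun i => (PySem.List.pyRange 0 ((arr.length : Int) + 1) 1).map
          (fun j => PySem.List.slice arr (some i) (some j))) =
        ((PySem.List.pyRange 0 (i0 : Int) 1).flatMap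
          (fun i => (PySem.List.pyRange 0 ((arr.length : Int) + 1) 1).map
            (fun j => PySem.List.slice arr (some i) (some j))) ++
         (PySem.List.pyRange 0 ((i0 + mwmLmax arr : Nat) : Int) 1).map
          (fun j => PySem.List.slice arr (some (i0 : Int)) (some j))) ++
        mwmWin arr i0 (mwmLmax arr) ::
        ((PySem.List.pyRange (((i0 + mwmLmax arr : Nat) : Int) + 1) ((arr.length : Int) + 1) 1).map
          (fun j => PySem.List.slice arr (some (i0 : Int)) (some j)) ++
         (PySem.List.pyRange ((i0 : Int) + 1) ((arr.length : Int) + 1) 1).flatMap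
          (fun i => (PySem.List.pyRange 0 ((arr.length : Int) + 1) 1).map
            (fun j => PySem.List.slice arr (some i) (some j)))) := by
      have h1 := congrArg (List.flatMap
        (fun i => (PySem.List.pyRange 0 ((arr.length : Int) + 1) 1).map
          (fun j => PySem.List.slice arr (some i) (some j)))) hsplit
      rw [h1]
      simp only [List.flatMap_append, List.flatMap_cons]
      rw [hmid]
      simp [List.append_assoc]
    rw [hBig]
    refine foldl_upd_first _ _ _ _ ?_ ?_ ?_ ?_
    · rw [mwmAbs_win]; exact hi0pal
    · intro v hv hp
      rw [hwlen]
      rcases List.mem_append.mp hv with hv1 | hv2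
      · simp only [List.mem_flatMap, List.mem_map] at hv1
        obtain ⟨i, hi, j, hj, rfl⟩ := hv1
        rw [PySem.List.mem_pyRange_one] at hi hj
        obtain ⟨ℓ, hb, hew, hlen, _⟩ := slice_window_char arr i j hi.1 hj.1 (by omega)
        rw [hlen]
        rw [hew, mwmAbs_win] at hp
        have hle : ℓ ≤ mwmLmax arr := pal_le_Lmax arr i.toNat ℓ hb hp
        rcases eq_or_lt_of_le hle with hEq | hLt
        · exfalso
          have hmin := Nat.find_min hP (show i.toNat < i0 by omega)
          rw [hEq] at hb hp
          exact hmin ⟨by omega, hb, hp⟩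
        · exact hLt
      · simp only [List.mem_map] at hv2
        obtain ⟨j, hj, rfl⟩ := hv2
        rw [PySem.List.mem_pyRange_one] at hj
        obtain ⟨ℓ, hb, hew, hlen, hup⟩ := slice_window_char arr (i0 : Int) j (by omega) hj.1 (by omega)
        rw [hlen]
        rw [Int.toNat_natCast] at hup
        omega
    · rw [hinitlen, hwlen]; omega
    · intro v hv hp
      rw [hwlen]
      rcases List.mem_append.mp hv with hv1 | hv2
      · simp only [List.mem_map] at hv1
        obtain ⟨j, hj, rfl⟩ := hv1
        rw [PySem.List.mem_pyRange_one] at hj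
        exact slice_pal_bound arr (i0 : Int) j (by omega) (by omega) (by omega) hp
      · simp only [List.mem_flatMap, List.mem_map] at hv2
        obtain ⟨i, hi, j, hj, rfl⟩ := hv2
        rw [PySem.List.mem_pyRange_one] at hi hj
        exact slice_pal_bound arr i j (by omega) hj.1 (by omega) hp

-- ===== B-side characterization =====

theorem B_search (arr : List Int) (hn : 1 ≤ arr.length)
    (hP : ∃ i, i < arr.length + 1 ∧ i + mwmLmax arr ≤ arr.length ∧
      mwmCheck (mwmWin (mwmAbs arr) i (mwmLmax arr)) = true) :
    ∀ L, mwmLmax arr ≤ L → L ≤ arr.length →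
      mwmSearch arr (mwmAbs arr) L = mwmWin arr (Nat.find hP) (mwmLmax arr) := by
  have hne : arr ≠ [] := by
    intro hc; rw [hc] at hn; simp at hn
  have hL1 : 1 ≤ mwmLmax arr := Nat.le_findGreatest hn (mwmP_one arr hne)
  obtain ⟨hi0n, hi0M, hi0pal⟩ := Nat.find_spec hP
  set i0 := Nat.find hP with hi0def
  intro L
  induction L with
  | zero => intro hLe _; omega
  | succ L ih =>
    intro hLe hub
    by_cases hEq : mwmLmax arr = L + 1
    · -- the current length is the maximal one: find? hits the least start i0
      have hKeq : (arr.length : Int) - ((L : Int) + 1) + 1 = ((arr.length - L : Nat) : Int) := by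
        omega
      have hwin : ∀ m : Nat, m + (L + 1) ≤ arr.length →
          mwmCheck (PySem.List.slice (mwmAbs arr) (some (m : Int))
            (some ((m : Int) + ((L : Int) + 1)))) =
          mwmCheck (mwmWin (mwmAbs arr) m (L + 1)) := by
        intro m _
        rw [show (m : Int) + ((L : Int) + 1) = ((m + (L + 1) : Nat) : Int) by push_cast; ring,
          PySem.List.slice_natCast, mwmWin, Nat.add_sub_cancel_left]
      have hfind : (PySem.List.pyRange 0 ((arr.length : Int) - ((L : Int) + 1) + 1) 1).find?
          (fun i => mwmCheck (PySem.List.slice (mwmAbs arr) (some i)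
            (some (i + ((L : Int) + 1))))) = some (i0 : Int) := by
        rw [hKeq, PySem.List.pyRange_zero_natCast, List.find?_map]
        have hfr : (List.range (arr.length - L)).find?
            ((fun i => mwmCheck (PySem.List.slice (mwmAbs arr) (some i)
              (some (i + ((L : Int) + 1))))) ∘ (fun k : Nat => (k : Int))) = some i0 := by
          refine find?_range_eq_some _ i0 _ ?_ ?_ (by omega)
          · show mwmCheck (PySem.List.slice (mwmAbs arr) (some (i0 : Int))
              (some ((i0 : Int) + ((L : Int) + 1)))) = true
            rw [hwin i0 (by omega), show L + 1 = mwmLmax arr from hEq.symm]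
            exact hi0pal
          · intro j hj
            show mwmCheck (PySem.List.slice (mwmAbs arr) (some (j : Int))
              (some ((j : Int) + ((L : Int) + 1)))) = false
            rw [hwin j (by omega), show L + 1 = mwmLmax arr from hEq.symm]
            by_contra hcon
            have hjt : mwmCheck (mwmWin (mwmAbs arr) j (mwmLmax arr)) = true := by
              cases hq : mwmCheck (mwmWin (mwmAbs arr) j (mwmLmax arr))
              · exact absurd hq hcon
              · rfl
            exact Nat.find_min hP hj ⟨by omega, by omega, hjt⟩
        rw [hfr, Option.map_some]
      simp only [mwmSearch, hfind]
      rw [show (i0 : Int) + ((L : Int) + 1) = ((i0 + (L + 1) : Nat) : Int) by push_cast; ring,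
        PySem.List.slice_natCast, mwmWin, Nat.add_sub_cancel_left, hEq]
    · -- no palindromic window this long: find? comes up empty, recurse
      have hLt : mwmLmax arr ≤ L := by omega
      have hnone : (PySem.List.pyRange 0 ((arr.length : Int) - ((L : Int) + 1) + 1) 1).find?
          (fun i => mwmCheck (PySem.List.slice (mwmAbs arr) (some i)
            (some (i + ((L : Int) + 1))))) = none := by
        apply List.find?_eq_none.mpr
        intro x hx
        rw [PySem.List.mem_pyRange_one] at hx
        simp only [Bool.not_eq_true]
        have hxe : x = ((x.toNat : Nat) : Int) := (Int.toNat_of_nonneg hx.1).symm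
        rw [hxe, show ((x.toNat : Nat) : Int) + ((L : Int) + 1) =
            ((x.toNat + (L + 1) : Nat) : Int) by push_cast; ring,
          PySem.List.slice_natCast]
        cases hq : mwmCheck (List.take (x.toNat + (L + 1) - x.toNat)
            (List.drop x.toNat (mwmAbs arr)))
        · rfl
        · exfalso
          rw [Nat.add_sub_cancel_left] at hq
          have hqq : mwmCheck (mwmWin (mwmAbs arr) x.toNat (L + 1)) = true := hq
          have := pal_le_Lmax arr x.toNat (L + 1) (by omega) hqq
          omega
      simp only [mwmSearch, hnone]
      exact ih (by omega) (by omega)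

theorem main_eq (arr : List Int) (h : arr ≠ []) :
    mainWindowMaker arr = mainWindowMaker_alt arr := by
  have hn : 1 ≤ arr.length := List.length_pos_iff.mpr h
  have hL1 : 1 ≤ mwmLmax arr := Nat.le_findGreatest hn (mwmP_one arr h)
  have hP0 : mwmPB arr (mwmLmax arr) = true := Nat.findGreatest_spec (P := fun L => mwmPB arr L = true) hn (mwmP_one arr h)
  have hP : ∃ i, i < arr.length + 1 ∧ i + mwmLmax arr ≤ arr.length ∧
      mwmCheck (mwmWin (mwmAbs arr) i (mwmLmax arr)) = true := by
    simpa only [mwmPB, decide_eq_true_eq] using hP0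
  rw [A_eq arr h hP]
  show _ = mainWindowMaker_alt arr
  unfold mainWindowMaker_alt
  rw [show arr.map (fun x => |x|) = mwmAbs arr from rfl]
  exact (B_search arr hn hP arr.length (Nat.findGreatest_le _) le_rfl).symm

-- ===== VERDICT (by name: the statement is the Claim_ definition above) =====
theorem mainWindowMaker_spec : Claim_equal_mainWindowMaker := by
  intro arr _ hpre
  unfold Spec_mainWindowMaker
  exact main_eq arr hpre

theorem mainWindowMaker_raises : Claim_raises_mainWindowMaker := by
  unfold Claim_raises_mainWindowMaker
  exact ⟨fun arr _ h hp => hp h, by decide⟩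

theorem pvRaiseWitness_mainWindowMaker_ok :
    Raises_mainWindowMaker pvRaiseWitness_mainWindowMaker ∧
      mainWindowMaker_alt pvRaiseWitness_mainWindowMaker = pvRaiseWitnessOut_mainWindowMaker :=
  mainWindowMaker_raises.2.2
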